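-- pv_equiv track=rewrite | github.com/RoboJackets/robocup-software | soccer/src/soccer/strategy/agent/communication/communication_gen.py | convert_cpp
-- ===== SOURCE A (Python) =====
-- def convert_cpp(requests, responses, hpp_names):
--     cpp = "#include \"communication.hpp\"\n"
--     cpp += "\nnamespace strategy::communication {\n\n"
--     cpp += "std::mutex request_uid_mutex;\n"
--     cpp += "u_int32_t request_uid = 0;\n\n"
--     cpp += "std::mutex response_uid_mutex;\n"
--     cpp += "u_int32_t response_uid = 0;\n\n"
--
--     for request in requests:
--         msgName = request[:-4] #Stripping .msg from the end
--         cpp += "bool operator==(const " + msgName + "& a, const " + msgName + "& b) {\n"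
--         cpp += "\treturn a.request_uid == b.request_uid;\n"
--         cpp += "}\n\n"
--
--     for response in responses:
--         msgName = response[:-4] #Stripping .msg from the end
--         cpp += "bool operator==(const " + msgName + "& a, const " + msgName + "& b) {\n"
--         cpp += "\treturn a.response_uid == b.response_uid;\n"
--         cpp += "}\n\n"
--
--     cpp += "bool operator==(const AgentRequest& a, const AgentRequest& b) {\n"
--     cpp += "\treturn (a.request == b.request) && (a.response == b.response);\n"
--     cpp += "}\n\n"
--
--     for request in requests:
--         msgName = request[:-4] #Stripping .msg from the end
--         cpp += "void generate_uid(" + msgName + "& request) {\n"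
--         cpp += "\trequest_uid_mutex.lock();\n"
--         cpp += "\trequest.request_uid = request_uid;\n"
--         cpp += "\trequest_uid++;\n"
--         cpp += "\trequest_uid_mutex.unlock();\n"
--         cpp += "}\n\n"
--
--     for response in responses:
--         msgName = response[:-4] #Stripping .msg from the end
--         cpp += "void generate_uid(" + msgName + "& response) {\n"
--         cpp += "\tresponse_uid_mutex.lock();\n"
--         cpp += "\tresponse.response_uid = response_uid;\n"
--         cpp += "\tresponse_uid++;\n"
--         cpp += "\tresponse_uid_mutex.unlock();\n"
--         cpp += "}\n\n"
--
--     cpp += "}"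
--     return cpp
-- ===== SOURCE B (Python) =====
-- HEADER = (
--     "#include \"communication.hpp\"\n"
--     "\nnamespace strategy::communication {\n\n"
--     "std::mutex request_uid_mutex;\n"
--     "u_int32_t request_uid = 0;\n\n"
--     "std::mutex response_uid_mutex;\n"
--     "u_int32_t response_uid = 0;\n\n"
-- )
--
-- AGENT_EQ = (
--     "bool operator==(const AgentRequest& a, const AgentRequest& b) {\n"
--     "\treturn (a.request == b.request) && (a.response == b.response);\n"
--     "}\n\n"
-- )
--
--
-- def _render(ins):
--     tag = ins[0]
--     if tag == "lit":
--         return ins[1]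
--     name, kind = ins[1], ins[2]
--     uid = kind + "_uid"
--     if tag == "eq":
--         return ("bool operator==(const %s& a, const %s& b) {\n"
--                 "\treturn a.%s == b.%s;\n"
--                 "}\n\n" % (name, name, uid, uid))
--     mutex = uid + "_mutex"
--     return ("void generate_uid(%s& %s) {\n"
--             "\t%s.lock();\n"
--             "\t%s.%s = %s;\n"
--             "\t%s++;\n"
--             "\t%s.unlock();\n"
--             "}\n\n" % (name, kind, mutex, kind, uid, uid, uid, mutex))
--
--
-- def convert_cpp(requests, responses, hpp_names):
--     # Stage 1: compile the whole file to an instruction-list IR.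
--     plan = ([("lit", HEADER)]
--             + [("eq", r[:-4], "request") for r in requests]
--             + [("eq", r[:-4], "response") for r in responses]
--             + [("lit", AGENT_EQ)]
--             + [("uid", r[:-4], "request") for r in requests]
--             + [("uid", r[:-4], "response") for r in responses]
--             + [("lit", "}")])
--     # Stage 2: interpret the IR, one render per instruction.
--     return "".join(map(_render, plan))
-- ===== Notes on version B (the rewrite author's own statement) =====
-- stated objective: alternative
-- what changed: A appends literal template text to one growing string in four separate scans; B is a two-stage mini-compiler: it first builds an explicit instruction-list IR (lit/eq/uid tagged tuples) describing the whole file, then a single interpreter pass renders each instruction, computing the uid and mutex identifiers from the message kind rather than from four hard-coded templates.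
import Mathlib
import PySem

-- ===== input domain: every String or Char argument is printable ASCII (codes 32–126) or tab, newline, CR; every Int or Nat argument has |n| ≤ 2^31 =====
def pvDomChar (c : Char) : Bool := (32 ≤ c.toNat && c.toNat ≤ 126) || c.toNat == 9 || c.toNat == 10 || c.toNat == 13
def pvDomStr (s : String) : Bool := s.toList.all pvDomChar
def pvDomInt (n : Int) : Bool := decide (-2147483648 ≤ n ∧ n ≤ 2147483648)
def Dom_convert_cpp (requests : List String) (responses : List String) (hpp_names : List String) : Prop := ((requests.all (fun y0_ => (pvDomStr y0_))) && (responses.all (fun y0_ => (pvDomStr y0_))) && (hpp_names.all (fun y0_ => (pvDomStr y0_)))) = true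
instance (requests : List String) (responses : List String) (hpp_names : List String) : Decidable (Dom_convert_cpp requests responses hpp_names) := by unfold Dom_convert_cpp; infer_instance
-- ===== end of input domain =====

-- B replaces A's four append-to-a-string scans by a two-stage mini-compiler: build an
-- instruction-list IR for the whole file, then interpret it, deriving the uid/mutex
-- identifiers from the message kind (objective: alternative decomposition, same cost).

-- ===== PORT A =====
-- request[:-4] (both Pythons strip the last four characters the same way)
def pvStrip4 (s : String) : String := PySem.Str.slice s none (some (-4))

def convert_cpp (requests : List String) (responses : List String) (hpp_names : List String) : String :=
  let cpp := "#include \"communication.hpp\"\n"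
  let cpp := cpp ++ "\nnamespace strategy::communication {\n\n"
  let cpp := cpp ++ "std::mutex request_uid_mutex;\n"
  let cpp := cpp ++ "u_int32_t request_uid = 0;\n\n"
  let cpp := cpp ++ "std::mutex response_uid_mutex;\n"
  let cpp := cpp ++ "u_int32_t response_uid = 0;\n\n"
  let cpp := requests.foldl (fun cpp request =>
    let msgName := pvStrip4 request
    let cpp := cpp ++ ("bool operator==(const " ++ msgName ++ "& a, const " ++ msgName ++ "& b) {\n")
    let cpp := cpp ++ "\treturn a.request_uid == b.request_uid;\n"
    cpp ++ "}\n\n") cpp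
  let cpp := responses.foldl (fun cpp response =>
    let msgName := pvStrip4 response
    let cpp := cpp ++ ("bool operator==(const " ++ msgName ++ "& a, const " ++ msgName ++ "& b) {\n")
    let cpp := cpp ++ "\treturn a.response_uid == b.response_uid;\n"
    cpp ++ "}\n\n") cpp
  let cpp := cpp ++ "bool operator==(const AgentRequest& a, const AgentRequest& b) {\n"
  let cpp := cpp ++ "\treturn (a.request == b.request) && (a.response == b.response);\n"
  let cpp := cpp ++ "}\n\n"
  let cpp := requests.foldl (fun cpp request =>
    let msgName := pvStrip4 request
    let cpp := cpp ++ ("void generate_uid(" ++ msgName ++ "& request) {\n")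
    let cpp := cpp ++ "\trequest_uid_mutex.lock();\n"
    let cpp := cpp ++ "\trequest.request_uid = request_uid;\n"
    let cpp := cpp ++ "\trequest_uid++;\n"
    let cpp := cpp ++ "\trequest_uid_mutex.unlock();\n"
    cpp ++ "}\n\n") cpp
  let cpp := responses.foldl (fun cpp response =>
    let msgName := pvStrip4 response
    let cpp := cpp ++ ("void generate_uid(" ++ msgName ++ "& response) {\n")
    let cpp := cpp ++ "\tresponse_uid_mutex.lock();\n"
    let cpp := cpp ++ "\tresponse.response_uid = response_uid;\n"
    let cpp := cpp ++ "\tresponse_uid++;\n"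
    let cpp := cpp ++ "\tresponse_uid_mutex.unlock();\n"
    cpp ++ "}\n\n") cpp
  cpp ++ "}"

-- ===== PORT B =====
def pvHeader : String :=
  "#include \"communication.hpp\"\n" ++
  "\nnamespace strategy::communication {\n\n" ++
  "std::mutex request_uid_mutex;\n" ++
  "u_int32_t request_uid = 0;\n\n" ++
  "std::mutex response_uid_mutex;\n" ++
  "u_int32_t response_uid = 0;\n\n"

def pvAgentEq : String :=
  "bool operator==(const AgentRequest& a, const AgentRequest& b) {\n" ++
  "\treturn (a.request == b.request) && (a.response == b.response);\n" ++
  "}\n\n"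

-- the instruction-list IR of Source B's ("lit", s) / ("eq", name, kind) / ("uid", name, kind) tuples
inductive PvInstr : Type where
  | lit : String → PvInstr
  | eq : String → String → PvInstr
  | uid : String → String → PvInstr

def pvRender : PvInstr → String
  | .lit s => s
  | .eq name kind =>
      let uid := kind ++ "_uid"
      "bool operator==(const " ++ name ++ "& a, const " ++ name ++ "& b) {\n" ++
      "\treturn a." ++ uid ++ " == b." ++ uid ++ ";\n" ++
      "}\n\n"
  | .uid name kind =>
      let uid := kind ++ "_uid"
      let mutex := uid ++ "_mutex"
      "void generate_uid(" ++ name ++ "& " ++ kind ++ ") {\n" ++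
      "\t" ++ mutex ++ ".lock();\n" ++
      "\t" ++ kind ++ "." ++ uid ++ " = " ++ uid ++ ";\n" ++
      "\t" ++ uid ++ "++;\n" ++
      "\t" ++ mutex ++ ".unlock();\n" ++
      "}\n\n"

def convert_cpp_alt (requests : List String) (responses : List String) (hpp_names : List String) : String :=
  let plan : List PvInstr :=
    [PvInstr.lit pvHeader]
      ++ requests.map (fun r => PvInstr.eq (pvStrip4 r) "request")
      ++ responses.map (fun r => PvInstr.eq (pvStrip4 r) "response")
      ++ [PvInstr.lit pvAgentEq]
      ++ requests.map (fun r => PvInstr.uid (pvStrip4 r) "request")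
      ++ responses.map (fun r => PvInstr.uid (pvStrip4 r) "response")
      ++ [PvInstr.lit "}"]
  String.join (plan.map pvRender)

-- ===== PRECONDITION & SPEC =====
def Spec_convert_cpp (requests : List String) (responses : List String) (hpp_names : List String) (out : String) : Prop := out = convert_cpp_alt requests responses hpp_names
instance (requests : List String) (responses : List String) (hpp_names : List String) (out : String) : Decidable (Spec_convert_cpp requests responses hpp_names out) := by unfold Spec_convert_cpp; infer_instance

-- ===== CLAIM (what is proved, stated in full; the proofs are below) =====
def Claim_equal_convert_cpp : Prop := ∀ (requests : List String) (responses : List String) (hpp_names : List String), Dom_convert_cpp requests responses hpp_names → Spec_convert_cpp requests responses hpp_names (convert_cpp requests responses hpp_names)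

-- ===== LEMMAS AND PROOFS =====

-- Appending through a foldl equals appending the join of the list.
theorem pv_foldl_join (l : List String) : ∀ init : String,
    l.foldl (fun r s => r ++ s) init = init ++ String.join l := by
  induction l with
  | nil => intro init; simp [String.join]
  | cons y l ih =>
    intro init
    have hy : String.join (y :: l) = y ++ String.join l := by
      show List.foldl (fun r s => r ++ s) ("" ++ y) l = _
      rw [ih]; simp
    rw [List.foldl_cons, ih, hy, String.append_assoc]

theorem pv_join_cons (x : String) (l : List String) :
    String.join (x :: l) = x ++ String.join l := by
  show List.foldl (fun r s => r ++ s) ("" ++ x) l = _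
  rw [pv_foldl_join]; simp

theorem pv_join_append (l m : List String) :
    String.join (l ++ m) = String.join l ++ String.join m := by
  induction l with
  | nil => simp [String.join]
  | cons x l ih => simp [pv_join_cons, ih, String.append_assoc]

theorem pv_join_nil : String.join ([] : List String) = "" := rfl

-- A's append-accumulating loop equals init ++ the joined mapped fragments.
theorem pv_fold_append {α : Type} (f : α → String) (xs : List α) (init : String) :
    xs.foldl (fun cpp x => cpp ++ f x) init = init ++ String.join (xs.map f) := by
  induction xs generalizing init with
  | nil => simp [String.join]
  | cons x xs ih => simp [ih, pv_join_cons, String.append_assoc]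

-- ===== VERDICT (by name: the statement is the Claim_ definition above) =====
theorem convert_cpp_spec : Claim_equal_convert_cpp := by
  intro requests responses hpp_names _
  show convert_cpp requests responses hpp_names = convert_cpp_alt requests responses hpp_names
  simp only [convert_cpp, convert_cpp_alt, List.map_append, List.map_map, List.map_cons,
    List.map_nil]
  simp only [String.append_assoc]
  rw [pv_fold_append, pv_fold_append, pv_fold_append, pv_fold_append]
  simp only [pv_join_append, pv_join_cons, pv_join_nil, pvHeader, pvAgentEq,
    Function.comp_def, pvRender, String.append_assoc]
  simp
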